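-- pv_equiv track=rewrite | github.com/luisalvaradoar/olimpiada.ct | 2016.4/2016.4.py | roland
-- ===== SOURCE A (Python) =====
-- def push(letra, pila):
--     return pila.insert(0, letra)
--
-- def pop(pila):
--     return pila.remove(pila[0])
--
-- def imprimir(pila, impreso):
--     return(impreso.append(pila[0]))
--
-- def roland(nota_str):
--     nota = []
--     for j in range(len(nota_str)):
--         nota.append(nota_str[j])
--
--     impreso = []
--     pila = [nota[0]]
--
--     i = 0
--     cont = 1
--     while impreso != nota:
--         letra_i = nota[i]
--         if pila[0] != letra_i:
--             if letra_i not in pila: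
--                 cont += 2
--                 push(letra_i, pila)
--                 imprimir(pila, impreso)
--                 i += 1
--             else:
--                 while pila.index(letra_i) != 0:
--                     cont += 1
--                     pop(pila)
--                 cont += 1
--                 imprimir(pila, impreso)
--                 i += 1
--         else:
--             cont += 1
--             imprimir(pila, impreso)
--             i += 1
--
--     return(cont + len(pila))
-- ===== SOURCE B (Python) =====
-- def split_parts(seg, c):
--     # segments of seg between occurrences of c (the c's themselves dropped)
--     parts = []
--     cur = []
--     for ch in seg:
--         if ch == c:
--             parts.append(cur)
--             cur = []
--         else:
--             cur.append(ch)
--     parts.append(cur)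
--     return parts
--
--
-- def pushes(seg):
--     # total number of stack pushes needed to print seg when seg[0] is freshly
--     # pushed: 1 for seg[0] itself; later occurrences of seg[0] just reset to it,
--     # so the pieces between them are independent sub-problems of the same shape
--     if not seg:
--         return 0
--     total = 1
--     for part in split_parts(seg[1:], seg[0]):
--         total += pushes(part)
--     return total
--
--
-- def roland(nota_str):
--     # cost accounting: every printed letter costs 1, every push costs 1 extra,
--     # and every pushed-or-initial letter is eventually paid once more (popped
--     # during the run or counted in the final stack), so with P = pushes(s)
--     # (which counts the initial letter too) the total is 1 + n + (P-1) + P + 1.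
--     return len(nota_str) + 2 * pushes(list(nota_str))
-- ===== Notes on version B (the rewrite author's own statement) =====
-- stated objective: alternative
-- what changed: Replaces the step-by-step stack simulation (membership scans, index-driven pop loop, running cost counter, final stack length) by a closed-form cost n + 2*pushes(s), where pushes is computed by a recursive divide-and-conquer: occurrences of a segment's first character split the remainder into independent sub-segments, with no stack and no cost bookkeeping at all.
import Mathlib
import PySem

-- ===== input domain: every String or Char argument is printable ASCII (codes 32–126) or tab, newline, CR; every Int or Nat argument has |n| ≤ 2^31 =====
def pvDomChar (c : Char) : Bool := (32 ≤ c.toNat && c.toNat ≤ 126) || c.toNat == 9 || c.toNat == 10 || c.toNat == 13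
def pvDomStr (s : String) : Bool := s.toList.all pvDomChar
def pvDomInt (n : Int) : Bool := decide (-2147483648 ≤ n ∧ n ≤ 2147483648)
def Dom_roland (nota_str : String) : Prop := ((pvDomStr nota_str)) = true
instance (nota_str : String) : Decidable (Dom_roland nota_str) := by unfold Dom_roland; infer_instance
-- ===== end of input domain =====

-- B replaces A's step-by-step stack simulation by a closed-form cost
-- len(s) + 2 * pushes(s), where pushes is computed by a recursive
-- first-character decomposition of the string (no stack, no cost counter).

-- ===== PORT A =====
-- inner loop: 'while pila.index(letra_i) != 0: cont += 1; pop(pila)'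
-- (pop(pila) = pila.remove(pila[0]) removes exactly the head)
def roland_popLoop (letra : Char) : List Char → Int → List Char × Int
  | [], cont => ([], cont)  -- unreachable: pila.index would raise; never hit from the outer loop
  | h :: t, cont =>
    if PySem.List.index? (h :: t) letra ≠ some 0 then roland_popLoop letra t (cont + 1)
    else (h :: t, cont)

-- outer 'while impreso != nota' loop; state (impreso, pila, i, cont); the loop appends
-- one letter to impreso per iteration, so fuel = len(nota) + 1 is never exhausted
def roland_loop (nota : List Char) : Nat → List Char → List Char → Int → Int → Int
  | 0, _, pila, _, cont => cont + pila.length  -- fuel exhausted: unreachable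
  | fuel + 1, impreso, pila, i, cont =>
    if impreso = nota then cont + pila.length  -- return cont + len(pila)
    else
      match PySem.List.pyGet? nota i, pila with
      | some letra, top :: rest =>
        if top ≠ letra then                             -- pila[0] != letra_i
          if letra ∉ (top :: rest) then                  -- letra_i not in pila
            let pila' := letra :: top :: rest            -- push(letra_i, pila)
            roland_loop nota fuel (impreso ++ [pila'.headD ' ']) pila' (i + 1) (cont + 2)
          else
            let pc := roland_popLoop letra (top :: rest) cont
            roland_loop nota fuel (impreso ++ [pc.1.headD ' ']) pc.1 (i + 1) (pc.2 + 1)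
        else
          roland_loop nota fuel (impreso ++ [(top :: rest).headD ' ']) (top :: rest) (i + 1) (cont + 1)
      | _, _ => cont + pila.length  -- IndexError in Python: unreachable under Pre_

def roland (nota_str : String) : Int :=
  -- the initial j-loop copies nota_str character by character: nota = list(nota_str)
  let nota := nota_str.toList
  match nota with
  | [] => 0  -- Python raises IndexError on pila = [nota[0]]; excluded by Pre_
  | c0 :: _ => roland_loop nota (nota.length + 1) [] [c0] 0 1

-- ===== PORT B =====
-- split_parts(seg, c): one forward loop with (parts, cur), then parts.append(cur)
def pvSplit (seg : List Char) (c : Char) : List (List Char) :=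
  let st := seg.foldl
    (fun (pc : List (List Char) × List Char) ch =>
      if ch = c then (pc.1 ++ [pc.2], []) else (pc.1, pc.2 ++ [ch])) ([], [])
  st.1 ++ [st.2]

-- length bound on the parts, cited by pvPushes' decreasing_by
theorem pvSplit_aux_le (seg : List Char) (c : Char) :
    ∀ (acc : List (List Char)) (cur part : List Char),
    part ∈ ((seg.foldl
      (fun (pc : List (List Char) × List Char) ch =>
        if ch = c then (pc.1 ++ [pc.2], []) else (pc.1, pc.2 ++ [ch])) (acc, cur)).1
      ++ [(seg.foldl
      (fun (pc : List (List Char) × List Char) ch =>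
        if ch = c then (pc.1 ++ [pc.2], []) else (pc.1, pc.2 ++ [ch])) (acc, cur)).2]) →
    part ∈ acc ∨ part.length ≤ cur.length + seg.length := by
  induction seg with
  | nil =>
    intro acc cur part h
    simp only [List.foldl_nil, List.mem_append, List.mem_singleton] at h
    rcases h with h | h
    · exact Or.inl h
    · exact Or.inr (by simp [h])
  | cons ch rest ih =>
    intro acc cur part h
    simp only [List.foldl_cons] at h
    by_cases hc : ch = c
    · rw [if_pos hc] at h
      rcases ih (acc ++ [cur]) [] part h with h' | h'
      · rcases List.mem_append.mp h' with h'' | h''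
        · exact Or.inl h''
        · right
          have hpc : part = cur := by simpa using h''
          simp only [hpc, List.length_cons]
          omega
      · right; simp at h' ⊢; omega
    · rw [if_neg hc] at h
      rcases ih acc (cur ++ [ch]) part h with h' | h'
      · exact Or.inl h'
      · right; simp at h' ⊢; omega

theorem pvSplit_length_le (seg : List Char) (c : Char) (part : List Char)
    (h : part ∈ pvSplit seg c) : part.length ≤ seg.length := by
  have := pvSplit_aux_le seg c [] [] part (by simpa [pvSplit] using h)
  rcases this with h' | h'
  · simp at h'
  · simpa using h'

-- pushes(seg): 0 on empty; else 1 plus pushes of every part of split_parts(seg[1:], seg[0])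
def pvPushes (seg : List Char) : Int :=
  match seg with
  | [] => 0
  | ch :: rest =>
    (pvSplit rest ch).attach.foldl (fun t p => t + pvPushes p.1) 1
termination_by seg.length
decreasing_by
  have := pvSplit_length_le rest ch p.1 p.2
  simp only [List.length_cons]
  omega

def roland_alt (nota_str : String) : Int :=
  PySem.Str.len nota_str + 2 * pvPushes nota_str.toList

-- ===== PRECONDITION & SPEC =====
-- A raises IndexError on the empty string (pila = [nota[0]]); excluded.
def Pre_roland (nota_str : String) : Prop := nota_str ≠ ""
instance (nota_str : String) : Decidable (Pre_roland nota_str) := by unfold Pre_roland; infer_instance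
def pvWitness_roland : String := "abcbab"

def Spec_roland (nota_str : String) (out : Int) : Prop := out = roland_alt nota_str
instance (nota_str : String) (out : Int) : Decidable (Spec_roland nota_str out) := by unfold Spec_roland; infer_instance

-- ===== CLAIM (what is proved, stated in full; the proofs are below) =====
def Claim_equal_roland : Prop := ∀ (nota_str : String), Dom_roland nota_str → Pre_roland nota_str → Spec_roland nota_str (roland nota_str)

-- ===== LEMMAS AND PROOFS =====

-- === proof-only intermediate: stack-and-push-count fold (top of stack at the FRONT, like pila) ===
def pvPC : List Char → List Char → List Char × Int
  | st, [] => (st, 0)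
  | st, ch :: rest =>
    match st with
    | [] => ([], 0)  -- never reached from a nonempty stack
    | top :: below =>
      if top = ch then pvPC (top :: below) rest
      else if ch ∈ top :: below then pvPC ((top :: below).dropWhile (· ≠ ch)) rest
      else let r := pvPC (ch :: top :: below) rest; (r.1, r.2 + 1)

theorem pvPC_nil_left : ∀ (p : List Char), pvPC [] p = ([], 0) := by
  intro p; cases p <;> rfl

theorem pv_dropWhile_ne_nil_of_mem (l : List Char) (c : Char) (h : c ∈ l) :
    l.dropWhile (· ≠ c) ≠ [] := by
  induction l with
  | nil => simp at h
  | cons x t ih =>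
    by_cases hx : x = c
    · subst hx; simp
    · rw [List.dropWhile_cons, if_pos (by simpa using hx)]
      have h' : c ∈ t := by
        rcases List.mem_cons.mp h with h' | h'
        exacts [absurd h'.symm hx, h']
      exact ih h'

theorem pvPC_stack_ne_nil : ∀ (p st : List Char), st ≠ [] → (pvPC st p).1 ≠ [] := by
  intro p
  induction p with
  | nil => intro st h; simpa [pvPC]
  | cons ch rest ih =>
    intro st h
    match st with
    | top :: below =>
      rw [pvPC]
      by_cases h1 : top = ch
      · rw [if_pos h1]; exact ih _ (by simp)
      · rw [if_neg h1]
        by_cases h2 : ch ∈ top :: below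
        · rw [if_pos h2]; exact ih _ (pv_dropWhile_ne_nil_of_mem _ _ h2)
        · rw [if_neg h2]
          have := ih (ch :: top :: below) (by simp)
          simpa using this

theorem pvPC_stack_sub : ∀ (p st : List Char) (x : Char),
    x ∈ (pvPC st p).1 → x ∈ st ∨ x ∈ p := by
  intro p
  induction p with
  | nil => intro st x h; simp [pvPC] at h; exact Or.inl h
  | cons ch rest ih =>
    intro st x h
    match st with
    | [] => rw [pvPC_nil_left] at h; simp at h
    | top :: below =>
      rw [pvPC] at h
      by_cases h1 : top = ch
      · rw [if_pos h1] at h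
        rcases ih _ x h with h' | h'
        · exact Or.inl h'
        · exact Or.inr (by simp [h'])
      · rw [if_neg h1] at h
        by_cases h2 : ch ∈ top :: below
        · rw [if_pos h2] at h
          rcases ih _ x h with h' | h'
          · exact Or.inl ((List.dropWhile_sublist _).subset h')
          · exact Or.inr (by simp [h'])
        · rw [if_neg h2] at h
          simp only at h
          rcases ih _ x h with h' | h'
          · rcases List.mem_cons.mp h' with h'' | h''
            · exact Or.inr (by simp [h''])
            · exact Or.inl h''
          · exact Or.inr (by simp [h'])

-- pvPC splits over ++ of the input
theorem pvPC_append : ∀ (p q st : List Char),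
    pvPC st (p ++ q) = ((pvPC (pvPC st p).1 q).1, (pvPC st p).2 + (pvPC (pvPC st p).1 q).2) := by
  intro p
  induction p with
  | nil => intro q st; simp [pvPC]
  | cons ch rest ih =>
    intro q st
    match st with
    | [] => rw [List.cons_append, pvPC_nil_left, pvPC_nil_left, pvPC_nil_left]; simp
    | top :: below =>
      rw [List.cons_append, pvPC, pvPC]
      by_cases h1 : top = ch
      · rw [if_pos h1, if_pos h1, ih]
      · rw [if_neg h1, if_neg h1]
        by_cases h2 : ch ∈ top :: below
        · rw [if_pos h2, if_pos h2, ih]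
        · rw [if_neg h2, if_neg h2]
          simp only [ih]
          ring_nf

-- the part of the stack below the working segment is inert
theorem pvPC_frame : ∀ (p e S : List Char), e ≠ [] → (∀ x ∈ p, x ∉ S) →
    pvPC (e ++ S) p = ((pvPC e p).1 ++ S, (pvPC e p).2) := by
  intro p
  induction p with
  | nil => intro e S _ _; simp [pvPC]
  | cons ch rest ih =>
    intro e S he hdis
    match e with
    | t :: e' =>
      have hchS : ch ∉ S := hdis ch (by simp)
      rw [List.cons_append, pvPC, pvPC]
      by_cases h1 : t = ch
      · rw [if_pos h1, if_pos h1]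
        exact ih (t :: e') S (by simp) (fun x hx => hdis x (by simp [hx]))
      · rw [if_neg h1, if_neg h1]
        by_cases h2 : ch ∈ t :: e'
        · rw [if_pos (by rw [← List.cons_append]; exact List.mem_append_left _ h2), if_pos h2]
          have hdw : ((t :: e') ++ S).dropWhile (· ≠ ch) = (t :: e').dropWhile (· ≠ ch) ++ S := by
            rw [List.dropWhile_append]
            rw [if_neg (by simpa [List.isEmpty_iff] using pv_dropWhile_ne_nil_of_mem _ _ h2)]
          rw [← List.cons_append, hdw]
          exact ih _ S (pv_dropWhile_ne_nil_of_mem _ _ h2) (fun x hx => hdis x (by simp [hx]))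
        · have h2' : ch ∉ (t :: e') ++ S := by
            simp only [List.mem_append]
            rintro (h | h)
            · exact h2 h
            · exact hchS h
          rw [if_neg (by rw [← List.cons_append]; exact h2'), if_neg h2]
          simp only
          have := ih (ch :: t :: e') S (by simp) (fun x hx => hdis x (by simp [hx]))
          rw [← List.cons_append, ← List.cons_append, this]
    | [] => exact absurd rfl he

-- === recursive characterisation of split_parts, for the proofs ===
def pvSplitR (c : Char) : List Char → List (List Char)
  | [] => [[]]
  | ch :: rest =>
    if ch = c then [] :: pvSplitR c rest
    else
      match pvSplitR c rest with
      | [] => [[ch]]  -- never happens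
      | r0 :: rs => (ch :: r0) :: rs

theorem pvSplitR_ne_nil (c : Char) (l : List Char) : pvSplitR c l ≠ [] := by
  cases l with
  | nil => simp [pvSplitR]
  | cons ch rest =>
    rw [pvSplitR]
    by_cases h : ch = c
    · simp [h]
    · rw [if_neg h]
      cases pvSplitR c rest <;> simp

def pvConsHd (cur : List Char) : List (List Char) → List (List Char)
  | [] => [cur]
  | r0 :: rs => (cur ++ r0) :: rs

theorem pvSplit_bridge_aux (c : Char) : ∀ (seg : List Char) (acc : List (List Char)) (cur : List Char),
    ((seg.foldl
      (fun (pc : List (List Char) × List Char) ch =>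
        if ch = c then (pc.1 ++ [pc.2], []) else (pc.1, pc.2 ++ [ch])) (acc, cur)).1
      ++ [(seg.foldl
      (fun (pc : List (List Char) × List Char) ch =>
        if ch = c then (pc.1 ++ [pc.2], []) else (pc.1, pc.2 ++ [ch])) (acc, cur)).2])
    = acc ++ pvConsHd cur (pvSplitR c seg) := by
  intro seg
  induction seg with
  | nil => intro acc cur; simp [pvSplitR, pvConsHd]
  | cons ch rest ih =>
    intro acc cur
    simp only [List.foldl_cons]
    by_cases h : ch = c
    · rw [if_pos h, ih, pvSplitR, if_pos h]
      cases hr : pvSplitR c rest with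
      | nil => exact absurd hr (pvSplitR_ne_nil c rest)
      | cons r0 rs => simp [pvConsHd]
    · rw [if_neg h, ih, pvSplitR, if_neg h]
      cases hr : pvSplitR c rest with
      | nil => exact absurd hr (pvSplitR_ne_nil c rest)
      | cons r0 rs => simp [pvConsHd]

theorem pvSplit_eq_splitR (seg : List Char) (c : Char) : pvSplit seg c = pvSplitR c seg := by
  have h := pvSplit_bridge_aux c seg [] []
  cases hr : pvSplitR c seg with
  | nil => exact absurd hr (pvSplitR_ne_nil c seg)
  | cons r0 rs =>
    rw [hr] at h
    simpa [pvSplit, pvConsHd] using h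

-- shape of pvSplitR: either no c at all, or split at the first c
theorem pvSplitR_cases (l : List Char) (c : Char) :
    (c ∉ l ∧ pvSplitR c l = [l]) ∨
    (∃ r0 l', l = r0 ++ c :: l' ∧ c ∉ r0 ∧ pvSplitR c l = r0 :: pvSplitR c l') := by
  induction l with
  | nil => exact Or.inl ⟨by simp, rfl⟩
  | cons ch rest ih =>
    by_cases h : ch = c
    · subst h
      exact Or.inr ⟨[], rest, by simp, by simp, by rw [pvSplitR, if_pos rfl]⟩
    · rcases ih with ⟨hnot, heq⟩ | ⟨r0, l', hl, hr0, heq⟩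
      · left
        refine ⟨?_, by rw [pvSplitR, if_neg h, heq]⟩
        simp only [List.mem_cons, not_or]
        exact ⟨fun h' => h h'.symm, hnot⟩
      · right
        refine ⟨ch :: r0, l', by simp [hl], ?_, by rw [pvSplitR, if_neg h, heq]⟩
        simp only [List.mem_cons, not_or]
        exact ⟨fun h' => h h'.symm, hr0⟩

-- unfold pvPushes into 1 + sum of the parts
theorem pv_foldl_attach_add (l : List (List Char)) (a : Int) (f : List Char → Int) :
    l.attach.foldl (fun t p => t + f p.1) a = a + (l.map f).sum := by
  rw [show (fun (t : Int) (p : {x // x ∈ l}) => t + f p.1)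
        = (fun t p => t + (fun (q : {x // x ∈ l}) => f q.1) p) from rfl,
      PySem.List.foldl_add]
  congr 1
  have : (fun (q : {x // x ∈ l}) => f q.1) = f ∘ Subtype.val := rfl
  rw [this, ← List.map_map, List.attach_map_subtype_val]

theorem pvPushes_cons (ch : Char) (rest : List Char) :
    pvPushes (ch :: rest) = 1 + ((pvSplitR ch rest).map pvPushes).sum := by
  rw [pvPushes, pv_foldl_attach_add, pvSplit_eq_splitR]

-- all elements of E different from c: dropWhile to c over (E ++ c :: suf) reaches c :: suf
theorem pv_dropWhile_all_ne (E : List Char) (c : Char) (suf : List Char) (h : ∀ x ∈ E, x ≠ c) :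
    (E ++ c :: suf).dropWhile (· ≠ c) = c :: suf := by
  induction E with
  | nil => rw [List.nil_append, List.dropWhile_cons, if_neg (by simp)]
  | cons x t ih =>
    rw [List.cons_append, List.dropWhile_cons,
        if_pos (by simpa using h x (by simp))]
    exact ih (fun y hy => h y (by simp [hy]))

-- === MAIN LEMMA B: pvPC from a singleton stack = sum of pushes over the split ===
theorem pvPC_split : ∀ (n : Nat) (seg : List Char) (c : Char), seg.length ≤ n →
    (pvPC [c] seg).2 = ((pvSplitR c seg).map pvPushes).sum := by
  intro n
  induction n with
  | zero =>
    intro seg c h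
    have : seg = [] := List.eq_nil_of_length_eq_zero (by omega)
    subst this
    simp [pvPC, pvSplitR, pvPushes]
  | succ n ih =>
    intro seg c hlen
    match seg with
    | [] => simp [pvPC, pvSplitR, pvPushes]
    | ch :: rest =>
      by_cases h1 : ch = c
      · subst h1
        rw [pvPC, if_pos rfl, pvSplitR, if_pos rfl]
        simp only [List.map_cons, List.sum_cons, pvPushes]
        rw [ih rest ch (by simp at hlen; omega)]
        simp
      · rw [pvPC, if_neg (fun h => h1 h.symm),
            if_neg (by simp [h1])]
        simp only
        rcases pvSplitR_cases rest c with ⟨hnot, heq⟩ | ⟨r0, l', hl, hr0, heq⟩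
        · -- no further c: the whole of ch :: rest is one part
          have hfr := pvPC_frame rest [ch] [c] (by simp)
            (fun x hx => by simp; rintro rfl; exact hnot hx)
          rw [show ([ch, c] : List Char) = [ch] ++ [c] from rfl, hfr]
          have hsplit : pvSplitR c (ch :: rest) = [ch :: rest] := by
            rw [pvSplitR, if_neg h1, heq]
          rw [hsplit]
          simp only [List.map_cons, List.map_nil, List.sum_cons, List.sum_nil, add_zero]
          rw [pvPushes_cons, ih rest ch (by simp at hlen; omega)]
          ring
        · -- rest = r0 ++ c :: l'
          subst hl
          rw [show (ch :: (r0 ++ c :: l')) = ch :: r0 ++ c :: l' by simp] at hlen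
          have hlen0 : r0.length ≤ n := by simp at hlen; omega
          have hlen' : l'.length ≤ n := by simp at hlen; omega
          rw [pvPC_append r0 (c :: l') [ch, c]]
          have hfr := pvPC_frame r0 [ch] [c] (by simp)
            (fun x hx => by simp; rintro rfl; exact hr0 hx)
          rw [show ([ch, c] : List Char) = [ch] ++ [c] from rfl, hfr]
          -- the stack after r0 is E ++ [c] with c ∉ E; the c pops it back to [c]
          have hEne : (pvPC [ch] r0).1 ≠ [] := pvPC_stack_ne_nil r0 [ch] (by simp)
          have hEnc : ∀ x ∈ (pvPC [ch] r0).1, x ≠ c := by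
            intro x hx
            rcases pvPC_stack_sub r0 [ch] x hx with h' | h'
            · simp at h'; subst h'; exact h1
            · rintro rfl; exact hr0 h'
          have hpop : pvPC ((pvPC [ch] r0).1 ++ [c]) (c :: l') = pvPC [c] l' := by
            match hE : (pvPC [ch] r0).1 with
            | [] => exact absurd hE hEne
            | t :: E' =>
              rw [List.cons_append, pvPC,
                  if_neg (by have := hEnc t (by rw [hE]; simp); simpa using this),
                  if_pos (by rw [← List.cons_append]; simp),
                  ← List.cons_append,
                  show ([c] : List Char) = c :: [] from rfl,
                  pv_dropWhile_all_ne _ c [] (by rw [← hE]; exact hEnc)]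
          rw [hpop]
          have hsplit : pvSplitR c (ch :: (r0 ++ c :: l')) = (ch :: r0) :: pvSplitR c l' := by
            rw [pvSplitR, if_neg h1, heq]
          rw [hsplit]
          simp only [List.map_cons, List.sum_cons]
          rw [pvPushes_cons, ih r0 ch hlen0, ih l' c hlen']
          ring

-- === MAIN LEMMA A: A's loop computes cont + |stack| + |rest| + 2 * pushes ===
theorem pv_popLoop_spec (letra : Char) (pila : List Char) (cont : Int) (m : Nat)
    (h : PySem.List.index? pila letra = some m) :
    roland_popLoop letra pila cont = (pila.drop m, cont + m) := by
  induction pila generalizing cont m with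
  | nil => simp [PySem.List.index?_eq_idxOf?] at h
  | cons x t ih =>
    by_cases hx : x = letra
    · subst hx
      rw [PySem.List.index?_cons_self] at h
      obtain rfl : (0 : Nat) = m := by simpa using h
      rw [roland_popLoop, if_neg (by rw [PySem.List.index?_cons_self]; simp)]
      simp
    · rw [PySem.List.index?_cons_of_ne t hx] at h
      obtain ⟨m', hm', rfl⟩ := Option.map_eq_some_iff.mp h
      rw [roland_popLoop]
      rw [if_pos (by rw [PySem.List.index?_cons_of_ne t hx, hm']; simp)]
      rw [ih _ _ hm']
      simp [add_assoc, add_comm (1 : Int)]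

theorem pv_take_succ (nota : List Char) (k : Nat) (ch : Char) (rest : List Char)
    (h : nota.drop k = ch :: rest) : nota.take (k + 1) = nota.take k ++ [ch] := by
  have hch : nota[k]? = some ch := by
    have h0 : (nota.drop k)[0]? = some ch := by rw [h]; rfl
    rw [List.getElem?_drop] at h0
    simpa using h0
  rw [List.take_add_one]
  simp [hch]

theorem pv_simA (nota : List Char) : ∀ (rest : List Char) (k : Nat) (stack : List Char) (cont : Int),
    nota.drop k = rest → stack ≠ [] →
    roland_loop nota (rest.length + 1) (nota.take k) stack (k : Int) cont
      = cont + (stack.length : Int) + (rest.length : Int) + 2 * (pvPC stack rest).2 := by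
  intro rest
  induction rest with
  | nil =>
    intro k stack cont hdrop hne
    have hk : nota.length ≤ k := by
      have := congrArg List.length hdrop; simp at this; omega
    rw [List.take_of_length_le hk]
    simp [roland_loop, pvPC]
  | cons ch rest' ih =>
    intro k stack cont hdrop hne
    have hklen : k < nota.length := by
      have := congrArg List.length hdrop; simp at this; omega
    have hget : PySem.List.pyGet? nota (k : Int) = some ch := by
      rw [PySem.List.pyGet?_natCast]
      have h0 : (nota.drop k)[0]? = some ch := by rw [hdrop]; rfl
      rw [List.getElem?_drop] at h0
      simpa using h0
    have hdrop' : nota.drop (k + 1) = rest' := by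
      rw [List.drop_add_one_eq_tail_drop, hdrop]; rfl
    have htake' : nota.take (k + 1) = nota.take k ++ [ch] := pv_take_succ nota k ch rest' hdrop
    have hne_imp : nota.take k ≠ nota := by
      intro hcontra
      have := congrArg List.length hcontra
      simp at this; omega
    have hcast : ((k : Int) + 1) = ((k + 1 : Nat) : Int) := by push_cast; ring
    match stack with
    | top :: below =>
      rw [show (ch :: rest').length + 1 = (rest'.length + 1) + 1 by simp, roland_loop.eq_def]
      simp only [if_neg hne_imp, hget]
      rw [pvPC]
      by_cases h1 : top = ch
      · subst h1
        rw [if_neg (by simp : ¬ top ≠ top), if_pos rfl]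
        rw [show (nota.take k ++ [(top :: below).headD ' ']) = nota.take (k + 1) by
              simp [htake'], hcast]
        rw [ih (k + 1) (top :: below) (cont + 1) hdrop' (by simp)]
        simp only [List.length_cons]
        push_cast; ring
      · rw [if_pos h1, if_neg h1]
        by_cases h2 : ch ∈ top :: below
        · rw [if_neg (not_not_intro h2), if_pos h2]
          obtain ⟨m, hm⟩ := Option.isSome_iff_exists.mp
            ((PySem.List.index?_isSome_iff (top :: below) ch).mpr h2)
          obtain ⟨pre, suf, hpre, hmlen, hchpre⟩ :=
            (PySem.List.index?_eq_some_iff (top :: below) ch m).mp hm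
          rw [pv_popLoop_spec ch (top :: below) cont m hm]
          have hdropm : (top :: below).drop m = ch :: suf := by
            rw [hpre, ← hmlen, List.drop_left' rfl]
          have hdw : (top :: below).dropWhile (· ≠ ch) = ch :: suf := by
            rw [hpre]
            exact pv_dropWhile_all_ne pre ch suf (fun x hx heq => hchpre (heq ▸ hx))
          rw [hdropm, hdw]
          simp only
          rw [show (nota.take k ++ [(ch :: suf).headD ' ']) = nota.take (k + 1) by
                simp [htake'], hcast]
          rw [ih (k + 1) (ch :: suf) (cont + (m : Int) + 1) hdrop' (by simp)]
          have hstlen : (top :: below).length = m + 1 + suf.length := by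
            rw [hpre, ← hmlen]; simp; omega
          rw [hstlen]
          simp only [List.length_cons]
          push_cast; ring
        · rw [if_pos h2, if_neg h2]
          simp only
          rw [show ((ch :: top :: below).headD ' ') = ch from rfl,
              show (nota.take k ++ [ch]) = nota.take (k + 1) by simp [htake'], hcast]
          rw [ih (k + 1) (ch :: top :: below) (cont + 2) hdrop' (by simp)]
          simp only [List.length_cons]
          push_cast; ring

-- ===== VERDICT (by name: the statement is the Claim_ definition above) =====
theorem roland_spec : Claim_equal_roland := by
  intro s _ hpre
  unfold Spec_roland roland roland_alt
  cases hl : s.toList with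
  | nil => exact absurd (String.toList_eq_nil_iff.mp hl) hpre
  | cons c0 cs =>
    have hA := pv_simA (c0 :: cs) (c0 :: cs) 0 [c0] 1 (by simp) (by simp)
    simp only [List.take_zero, Nat.cast_zero] at hA
    show roland_loop (c0 :: cs) ((c0 :: cs).length + 1) [] [c0] 0 1
      = PySem.Str.len s + 2 * pvPushes (c0 :: cs)
    rw [hA]
    have hPC : (pvPC [c0] (c0 :: cs)).2 = (pvPC [c0] cs).2 := by
      rw [pvPC, if_pos rfl]
    rw [hPC, pvPC_split cs.length cs c0 le_rfl]
    rw [PySem.Str.len_eq, hl, pvPushes_cons]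
    simp only [List.length_cons, List.length_nil]
    push_cast; ring
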